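-- pv_equiv track=rewrite | github.com/BossWangST/ProblemSet | python/2022-1-10/cce2017B.py | func
-- ===== SOURCE A (Python) =====
-- from typing import List
-- import itertools
--
-- def func(k: int, nums: List[int]) -> int:
--     init = [0]
--     init.extend(nums)
--     pre_sum = list(itertools.accumulate(init))
--     omit = nums[k]
--     for i in range(len(pre_sum)):
--         if i > k + 1:
--             pre_sum[i] -= omit
--     left_min = min(pre_sum[:k + 1])
--     right_max = max(pre_sum[k + 2:])
--     return right_max + left_min
-- ===== SOURCE B (Python) =====
-- from typing import List
--
-- def _min_pref(xs):
--     # minimum sum over prefixes of xs (the empty prefix included):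
--     # right fold of acc -> min(0, x + acc)
--     acc = 0
--     for x in reversed(xs):
--         acc = min(0, x + acc)
--     return acc
--
-- def _max_pref(xs):
--     # maximum sum over prefixes of xs (the empty prefix included)
--     acc = 0
--     for x in reversed(xs):
--         acc = max(0, x + acc)
--     return acc
--
-- def func(k: int, nums: List[int]) -> int:
--     base = sum(nums[:k + 2]) - nums[k]
--     return base + _max_pref(nums[k + 2:]) + _min_pref(nums[:k])
-- ===== Notes on version B (the rewrite author's own statement) =====
-- stated objective: alternative
-- what changed: Replaces A's prefix-sum array (accumulate, an index-conditional mutation pass, min/max over slices of it) by a closed-form base sum plus two best-prefix-extension values computed by a right fold (min prefix sum of the left part, max prefix sum of the right part), with no prefix array and no sweep over one.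
-- outside the precondition, e.g. on func(-2, [1, 2, 3]): A returns 2, B returns 4; on func(-3, [1, 2, 3, 4]): A returns 6, B returns 8
import Mathlib
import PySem

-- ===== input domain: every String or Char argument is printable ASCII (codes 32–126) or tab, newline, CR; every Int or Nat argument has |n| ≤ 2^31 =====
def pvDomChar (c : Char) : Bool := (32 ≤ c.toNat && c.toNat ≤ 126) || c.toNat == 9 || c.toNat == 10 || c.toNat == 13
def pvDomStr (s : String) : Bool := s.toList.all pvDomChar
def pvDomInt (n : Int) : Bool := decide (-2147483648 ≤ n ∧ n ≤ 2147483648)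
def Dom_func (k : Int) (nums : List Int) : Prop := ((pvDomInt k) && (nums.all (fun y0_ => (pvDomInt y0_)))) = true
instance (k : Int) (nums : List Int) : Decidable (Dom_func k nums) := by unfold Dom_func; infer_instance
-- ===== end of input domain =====

-- B replaces the prefix-sum array, its mutation pass and the slice min/max scans by a
-- closed-form base sum plus two recursive best-prefix-extension values (same O(n) cost).

-- ===== PORT A =====
-- itertools.accumulate: running sums; accAux s xs are the running sums of xs started at s
def accAux (s : Int) : List Int → List Int
  | [] => []
  | x :: xs => (s + x) :: accAux (s + x) xs

def pyAccumulate : List Int → List Int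
  | [] => []
  | x :: xs => x :: accAux x xs

def func (k : Int) (nums : List Int) : Int :=
  let init : List Int := 0 :: nums                      -- init = [0]; init.extend(nums)
  let preSum := pyAccumulate init                       -- list(itertools.accumulate(init))
  let om := PySem.List.pyGetD nums k 0                  -- nums[k]; in range under Pre_
  -- for i in range(len(pre_sum)): if i > k+1: pre_sum[i] -= omit
  let preSum2 := (PySem.List.enumerate preSum 0).map
      (fun iv => if iv.1 > k + 1 then iv.2 - om else iv.2)
  let leftMin := (PySem.List.min? (PySem.List.slice preSum2 none (some (k + 1)))
      (fun y => y)).getD 0                              -- min(pre_sum[:k+1]); nonempty under Pre_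
  let rightMax := (PySem.List.max? (PySem.List.slice preSum2 (some (k + 2)) none)
      (fun y => y)).getD 0                              -- max(pre_sum[k+2:]); nonempty under Pre_
  rightMax + leftMin

-- ===== PORT B =====
-- minimum sum over prefixes of xs (the empty prefix included): Source B's right fold
def minPref (xs : List Int) : Int := xs.foldr (fun x acc => min 0 (x + acc)) 0

-- maximum sum over prefixes of xs (the empty prefix included): Source B's right fold
def maxPref (xs : List Int) : Int := xs.foldr (fun x acc => max 0 (x + acc)) 0

def func_alt (k : Int) (nums : List Int) : Int :=
  let base := (PySem.List.slice nums none (some (k + 2))).sum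
      - PySem.List.pyGetD nums k 0                      -- sum(nums[:k+2]) - nums[k]
  base + maxPref (PySem.List.slice nums (some (k + 2)) none)
      + minPref (PySem.List.slice nums none (some k))

-- ===== PRECONDITION & SPEC =====
-- Pre_ excludes: k ≥ len-1 and k = -1 and k < -len, where A raises (ValueError / IndexError);
-- and -len ≤ k ≤ -2, where A returns an accidental value (end-relative slices taken over the
-- length-(len+1) prefix-sum array, with omit subtracted from every entry) that no natural
-- reimplementation produces — B returns its own equally accidental value there.
def Pre_func (k : Int) (nums : List Int) : Prop := 0 ≤ k ∧ k ≤ (nums.length : Int) - 2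
instance (k : Int) (nums : List Int) : Decidable (Pre_func k nums) := by
  unfold Pre_func; infer_instance

def pvWitness_func : Int × List Int := (1, [3, -1, 4, -2])

def Spec_func (k : Int) (nums : List Int) (out : Int) : Prop := out = func_alt k nums
instance (k : Int) (nums : List Int) (out : Int) : Decidable (Spec_func k nums out) := by
  unfold Spec_func; infer_instance

-- ===== CLAIM (what is proved, stated in full; the proofs are below) =====
def Claim_equal_func : Prop := ∀ (k : Int) (nums : List Int), Dom_func k nums → Pre_func k nums → Spec_func k nums (func k nums)

-- ===== LEMMAS AND PROOFS =====

theorem accAux_append (X Y : List Int) : ∀ s,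
    accAux s (X ++ Y) = accAux s X ++ accAux (s + X.sum) Y := by
  induction X with
  | nil => intro s; simp [accAux]
  | cons x xs ih => intro s; simp [accAux, ih (s + x), add_assoc]

theorem length_accAux (X : List Int) : ∀ s, (accAux s X).length = X.length := by
  induction X with
  | nil => intro s; simp [accAux]
  | cons x xs ih => intro s; simp [accAux, ih]

-- indices all ≤ c: the enumerate-map leaves the segment unchanged
theorem enumMap_low (c om : Int) (Z : List Int) : ∀ s, s + Z.length ≤ c + 1 →
    (PySem.List.enumerate Z s).map
      (fun iv => if iv.1 > c then iv.2 - om else iv.2) = Z := by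
  induction Z with
  | nil => intro s _; simp [PySem.List.enumerate_nil]
  | cons x xs ih =>
    intro s h
    simp only [PySem.List.enumerate_cons, List.map_cons]
    rw [if_neg (by simp at h; omega), ih (s + 1) (by simp at h ⊢; omega)]

-- indices all > c: the enumerate-map subtracts om everywhere
theorem enumMap_high (c om : Int) (Z : List Int) : ∀ s, c < s →
    (PySem.List.enumerate Z s).map
      (fun iv => if iv.1 > c then iv.2 - om else iv.2) = Z.map (· - om) := by
  induction Z with
  | nil => intro s _; simp [PySem.List.enumerate_nil]
  | cons x xs ih =>
    intro s h
    simp only [PySem.List.enumerate_cons, List.map_cons]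
    rw [if_pos h, ih (s + 1) (by omega)]

theorem minPref_cons (x : Int) (xs : List Int) :
    minPref (x :: xs) = min 0 (x + minPref xs) := rfl

theorem maxPref_cons (x : Int) (xs : List Int) :
    maxPref (x :: xs) = max 0 (x + maxPref xs) := rfl

theorem minPref_nonpos (X : List Int) : minPref X ≤ 0 := by
  cases X with
  | nil => simp [minPref]
  | cons x xs => rw [minPref_cons]; simp

theorem maxPref_nonneg (X : List Int) : 0 ≤ maxPref X := by
  cases X with
  | nil => simp [maxPref]
  | cons x xs => rw [maxPref_cons]; simp

theorem accAux_map_sub (a : Int) (X : List Int) : ∀ s,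
    (accAux s X).map (· - a) = accAux (s - a) X := by
  induction X with
  | nil => intro s; simp [accAux]
  | cons x xs ih =>
    intro s
    simp only [accAux, List.map_cons, ih (s + x)]
    have h : s + x - a = s - a + x := by ring
    rw [h]

-- the running-min fold over the partial sums computes the minimum prefix sum
theorem foldl_min_acc (X : List Int) : ∀ s m, m ≤ s →
    (accAux s X).foldl min m = min m (s + minPref X) := by
  induction X with
  | nil => intro s m h; simp [accAux, minPref]; omega
  | cons x xs ih =>
    intro s m h
    simp only [accAux, List.foldl_cons, minPref_cons]
    rw [ih (s + x) (min m (s + x)) (by omega)]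
    have := minPref_nonpos xs
    omega

-- the running-max fold over the partial sums computes the maximum prefix sum
theorem foldl_max_acc (X : List Int) : ∀ s m, s ≤ m →
    (accAux s X).foldl max m = max m (s + maxPref X) := by
  induction X with
  | nil => intro s m h; simp [accAux, maxPref]; omega
  | cons x xs ih =>
    intro s m h
    simp only [accAux, List.foldl_cons, maxPref_cons]
    rw [ih (s + x) (max m (s + x)) (by omega)]
    have := maxPref_nonneg xs
    omega

theorem key (P : List Int) (a b : Int) (Q : List Int) :
    func ((P.length : Nat) : Int) (P ++ a :: b :: Q)
      = func_alt ((P.length : Nat) : Int) (P ++ a :: b :: Q) := by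
  have hcast1 : ((P.length : Nat) : Int) + 1 = ((P.length + 1 : Nat) : Int) := by push_cast; ring
  have hcast2 : ((P.length : Nat) : Int) + 2 = ((P.length + 2 : Nat) : Int) := by push_cast; ring
  have hga : PySem.List.pyGetD (P ++ a :: b :: Q) ((P.length : Nat) : Int) 0 = a := by
    rw [PySem.List.pyGetD_natCast]; simp [List.getD_eq_getElem?_getD]
  have hacc : pyAccumulate (0 :: (P ++ a :: b :: Q))
      = 0 :: (accAux 0 P ++ (P.sum + a) :: (P.sum + a + b) :: accAux (P.sum + a + b) Q) := by
    simp [pyAccumulate, accAux_append, accAux, add_assoc]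
  have hsplit1 : (0 : Int) :: (accAux 0 P ++ (P.sum + a) :: (P.sum + a + b) :: accAux (P.sum + a + b) Q)
      = (0 :: accAux 0 P) ++ ((P.sum + a) :: (P.sum + a + b) :: accAux (P.sum + a + b) Q) := by simp
  have hsplit2 : (0 : Int) :: (accAux 0 P ++ (P.sum + a) :: (P.sum + a + b) :: accAux (P.sum + a + b) Q)
      = ((0 :: accAux 0 P) ++ [P.sum + a]) ++ ((P.sum + a + b) :: accAux (P.sum + a + b) Q) := by simp
  have hsliceB1 : PySem.List.slice (P ++ a :: b :: Q) none (some (((P.length : Nat) : Int) + 2))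
      = P ++ [a, b] := by
    rw [hcast2, PySem.List.slice_to_natCast]
    have h : P ++ a :: b :: Q = (P ++ [a, b]) ++ Q := by simp
    rw [h, List.take_left' (by simp)]
  have hsliceB2 : PySem.List.slice (P ++ a :: b :: Q) (some (((P.length : Nat) : Int) + 2)) none = Q := by
    rw [hcast2, PySem.List.slice_from_natCast]
    have h : P ++ a :: b :: Q = (P ++ [a, b]) ++ Q := by simp
    rw [h, List.drop_left' (by simp)]
  have hsliceB3 : PySem.List.slice (P ++ a :: b :: Q) none (some ((P.length : Nat) : Int)) = P := by
    rw [PySem.List.slice_to_natCast, List.take_left]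
  simp only [func, func_alt, hga, hacc, hsliceB1, hsliceB2, hsliceB3]
  rw [hcast1, PySem.List.slice_to_natCast, hcast2, PySem.List.slice_from_natCast]
  have htake : List.take (P.length + 1)
      (List.map (fun iv => if iv.1 > ((P.length + 1 : Nat) : Int) then iv.2 - a else iv.2)
        (PySem.List.enumerate (0 :: (accAux 0 P ++ (P.sum + a) :: (P.sum + a + b) :: accAux (P.sum + a + b) Q))))
      = 0 :: accAux 0 P := by
    conv_lhs => rw [hsplit1]
    rw [PySem.List.enumerate_append, List.map_append,
        List.take_left' (by simp [PySem.List.length_enumerate, length_accAux]),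
        enumMap_low ((P.length + 1 : Nat) : Int) a (0 :: accAux 0 P)]
    simp [length_accAux]
  have hdrop : List.drop (P.length + 2)
      (List.map (fun iv => if iv.1 > ((P.length + 1 : Nat) : Int) then iv.2 - a else iv.2)
        (PySem.List.enumerate (0 :: (accAux 0 P ++ (P.sum + a) :: (P.sum + a + b) :: accAux (P.sum + a + b) Q))))
      = (P.sum + a + b - a) :: (accAux (P.sum + a + b) Q).map (· - a) := by
    conv_lhs => rw [hsplit2]
    rw [PySem.List.enumerate_append, List.map_append,
        List.drop_left' (by simp [PySem.List.length_enumerate, length_accAux]),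
        enumMap_high ((P.length + 1 : Nat) : Int) a ((P.sum + a + b) :: accAux (P.sum + a + b) Q)
          _ (by simp [length_accAux])]
    simp
  rw [htake, hdrop, PySem.List.min?_id_cons, PySem.List.max?_id_cons, Option.getD_some,
      Option.getD_some, accAux_map_sub,
      foldl_min_acc P 0 0 le_rfl,
      foldl_max_acc Q (P.sum + a + b - a) (P.sum + a + b - a) le_rfl]
  have h1 := minPref_nonpos P
  have h2 := maxPref_nonneg Q
  simp only [List.sum_append, List.sum_cons, List.sum_nil]
  omega

-- ===== VERDICT (by name: the statement is the Claim_ definition above) =====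
theorem func_spec : Claim_equal_func := by
  intro k nums _ hpre
  unfold Spec_func
  obtain ⟨hk0, hk2⟩ := hpre
  have hke : k = ((k.toNat : Nat) : Int) := (Int.toNat_of_nonneg hk0).symm
  have hlen : k.toNat + 2 ≤ nums.length := by omega
  have hPlen : (nums.take k.toNat).length = k.toNat := by simp; omega
  have h1 : nums.drop k.toNat = nums[k.toNat]'(by omega) :: nums.drop (k.toNat + 1) :=
    List.drop_eq_getElem_cons (by omega)
  have h2 : nums.drop (k.toNat + 1) = nums[k.toNat + 1]'(by omega) :: nums.drop (k.toNat + 2) :=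
    List.drop_eq_getElem_cons (by omega)
  have hdecomp : nums = nums.take k.toNat ++ nums[k.toNat]'(by omega) ::
      nums[k.toNat + 1]'(by omega) :: nums.drop (k.toNat + 2) := by
    conv_lhs => rw [← List.take_append_drop k.toNat nums, h1, h2]
  calc func k nums
      = func (((nums.take k.toNat).length : Nat) : Int) (nums.take k.toNat ++
          nums[k.toNat]'(by omega) :: nums[k.toNat + 1]'(by omega) :: nums.drop (k.toNat + 2)) := by
        rw [hPlen, ← hke, ← hdecomp]
    _ = func_alt (((nums.take k.toNat).length : Nat) : Int) (nums.take k.toNat ++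
          nums[k.toNat]'(by omega) :: nums[k.toNat + 1]'(by omega) :: nums.drop (k.toNat + 2)) :=
        key _ _ _ _
    _ = func_alt k nums := by rw [hPlen, ← hke, ← hdecomp]
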